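-- pv_equiv track=rewrite | github.com/alexandrahendriks/School_Projects | Back_End/for_loop_exercise/main.py | most_vowels
-- ===== SOURCE A (Python) =====
-- def most_vowels(country_names):
--     vowel = set("aeiouAEIOU")
--     most_vowels = []
--     for country in country_names:
--         count = 0
--         for i in country:
--             if i in vowel:
--                 count = count + 1
--         if count > 10:
--             most_vowels.append(country)
--     sorted_list = sorted(most_vowels,key=lambda word: sum(ch in 'aeiouAEIOU' for ch in word),reverse=True)
--     return sorted_list[0:3]
-- ===== SOURCE B (Python) =====
-- def most_vowels(country_names):
--     def vowel_count(word):
--         return sum(ch in "aeiouAEIOU" for ch in word)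
--
--     def extract_best(cands):
--         # first pair with the strictly largest count, and the rest in order
--         if len(cands) == 1:
--             return cands[0], []
--         head, tail = cands[0], cands[1:]
--         b, rest = extract_best(tail)
--         if head[1] < b[1]:
--             return b, [head] + rest
--         return head, tail
--
--     def select(cands, k):
--         if k == 0 or not cands:
--             return []
--         b, rest = extract_best(cands)
--         return [b[0]] + select(rest, k - 1)
--
--     cands = []
--     for country in country_names:
--         c = vowel_count(country)
--         if c > 10:
--             cands.append((country, c))
--     return select(cands, 3)
-- ===== Notes on version B (the rewrite author's own statement) =====
-- stated objective: alternative
-- what changed: A sorts the whole filtered candidate list by vowel count (descending, stable) and slices the first three; B caches each candidate's vowel count in a pair and selects the top three by repeated first-maximum extraction, never sorting the rest.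
import Mathlib
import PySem

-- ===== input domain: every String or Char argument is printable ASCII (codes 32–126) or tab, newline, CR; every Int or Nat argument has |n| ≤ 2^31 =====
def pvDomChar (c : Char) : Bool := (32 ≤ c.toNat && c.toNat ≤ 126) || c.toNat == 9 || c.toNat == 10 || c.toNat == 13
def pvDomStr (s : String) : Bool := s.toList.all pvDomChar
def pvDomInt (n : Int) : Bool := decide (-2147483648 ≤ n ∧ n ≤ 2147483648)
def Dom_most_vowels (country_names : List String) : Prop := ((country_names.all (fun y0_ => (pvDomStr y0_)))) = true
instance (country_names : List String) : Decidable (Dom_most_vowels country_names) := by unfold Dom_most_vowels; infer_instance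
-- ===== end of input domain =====

-- B replaces A's full descending sort + [0:3] slice by a top-3 selection (repeated
-- first-maximum extraction) over candidates carrying their cached vowel counts
-- (objective: alternative algorithm, same results).

-- ===== PORT A =====
-- `ch in 'aeiouAEIOU'` for a single char equals membership of that char in the string's characters (exact).
def most_vowels (country_names : List String) : List String :=
  let vowel : PySem.Set Char := PySem.Set.ofList "aeiouAEIOU".toList
  let mv : List String := country_names.foldl (fun acc country =>
    let count : Int := country.toList.foldl (fun count i => if i ∈ vowel then count + 1 else count) 0
    if count > 10 then acc ++ [country] else acc) []
  let sorted_list := PySem.List.sorted mv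
    (fun word => (word.toList.map (fun ch => if ("aeiouAEIOU".toList.contains ch) then (1 : Int) else 0)).sum) true
  PySem.List.slice sorted_list (some 0) (some 3)

-- ===== PORT B =====
def mvB_count (word : String) : Int :=
  (word.toList.map (fun ch => if ("aeiouAEIOU".toList.contains ch) then (1 : Int) else 0)).sum

-- extract_best(cands) for nonempty cands, given as head h and tail t
def mvB_extractBest (h : String × Int) (t : List (String × Int)) :
    (String × Int) × List (String × Int) :=
  match t with
  | [] => (h, [])
  | x :: xs =>
    let br := mvB_extractBest x xs
    if h.2 < br.1.2 then (br.1, h :: br.2) else (h, x :: xs)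

def mvB_select (cands : List (String × Int)) (k : Nat) : List String :=
  match k, cands with
  | 0, _ => []
  | _, [] => []
  | Nat.succ k', c :: cs =>
    let br := mvB_extractBest c cs
    br.1.1 :: mvB_select br.2 k'
termination_by k

def most_vowels_alt (country_names : List String) : List String :=
  let cands : List (String × Int) := country_names.foldl (fun acc country =>
    let c := mvB_count country
    if c > 10 then acc ++ [(country, c)] else acc) []
  mvB_select cands 3

-- ===== PRECONDITION & SPEC =====
def Spec_most_vowels (country_names : List String) (out : List String) : Prop := out = most_vowels_alt country_names
instance (country_names : List String) (out : List String) : Decidable (Spec_most_vowels country_names out) := by unfold Spec_most_vowels; infer_instance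

-- ===== CLAIM (what is proved, stated in full; the proofs are below) =====
def Claim_equal_most_vowels : Prop := ∀ (country_names : List String), Dom_most_vowels country_names → Spec_most_vowels country_names (most_vowels country_names)

-- ===== LEMMAS AND PROOFS =====

-- A's set-membership counting loop computes the same vowel count as the sum-of-map key.
theorem mv_count_aux (cs : List Char) (a : Int) :
    cs.foldl (fun count i => if i ∈ PySem.Set.ofList "aeiouAEIOU".toList then count + 1 else count) a
      = a + (cs.map (fun ch => if ("aeiouAEIOU".toList.contains ch) then (1 : Int) else 0)).sum := by
  induction cs generalizing a with
  | nil => simp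
  | cons c cs ih =>
    rw [List.foldl_cons, List.map_cons, List.sum_cons, ih]
    have hiff : (c ∈ PySem.Set.ofList "aeiouAEIOU".toList) ↔ ("aeiouAEIOU".toList.contains c = true) := by
      rw [PySem.Set.mem_ofList, List.contains_iff_mem]
    by_cases h : "aeiouAEIOU".toList.contains c = true
    · rw [if_pos (hiff.mpr h), if_pos h]; ring
    · rw [if_neg (fun hm => h (hiff.mp hm)), if_neg h]; ring

theorem mv_count_eq (w : String) :
    w.toList.foldl
      (fun count i => if i ∈ PySem.Set.ofList "aeiouAEIOU".toList then count + 1 else count)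
      (0 : Int) = mvB_count w := by
  rw [mv_count_aux]; simp [mvB_count]

-- A's candidate list is the first projection of B's, and B's pairs carry the count of their name.
theorem mv_cands_rel (country_names : List String) (accA : List String)
    (accB : List (String × Int)) (hmap : accA = accB.map Prod.fst)
    (hkey : ∀ p ∈ accB, p.2 = mvB_count p.1) :
    (country_names.foldl (fun acc country =>
        let count : Int := country.toList.foldl
          (fun count i => if i ∈ PySem.Set.ofList "aeiouAEIOU".toList then count + 1 else count) 0
        if count > 10 then acc ++ [country] else acc) accA
      = (country_names.foldl (fun acc country =>
          let c := mvB_count country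
          if c > 10 then acc ++ [(country, c)] else acc) accB).map Prod.fst)
    ∧ ∀ p ∈ country_names.foldl (fun acc country =>
          let c := mvB_count country
          if c > 10 then acc ++ [(country, c)] else acc) accB, p.2 = mvB_count p.1 := by
  induction country_names generalizing accA accB with
  | nil => exact ⟨hmap, hkey⟩
  | cons w ws ih =>
    rw [List.foldl_cons, List.foldl_cons]
    simp only [mv_count_eq w]
    by_cases h : mvB_count w > 10
    · rw [if_pos h, if_pos h]
      refine ih _ _ ?_ ?_
      · simp [hmap]
      · intro p hp
        rcases List.mem_append.mp hp with h1 | h1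
        · exact hkey p h1
        · simp at h1; subst h1; rfl
    · rw [if_neg h, if_neg h]
      exact ih _ _ hmap hkey

-- inserting the name of a count-consistent pair commutes with projecting the names
theorem mv_insertBy_map (x : String × Int) (ys : List (String × Int))
    (hx : x.2 = mvB_count x.1) (hys : ∀ y ∈ ys, y.2 = mvB_count y.1) :
    PySem.List.insertBy (fun a b => decide (mvB_count b < mvB_count a)) x.1 (ys.map Prod.fst)
      = (PySem.List.insertBy (fun a b => decide (b.2 < a.2)) x ys).map Prod.fst := by
  induction ys with
  | nil => rfl
  | cons y ys ih =>
    have hy : y.2 = mvB_count y.1 := hys y (List.mem_cons_self)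
    have hb : (decide (mvB_count y.1 < mvB_count x.1)) = (decide (y.2 < x.2)) := by
      rw [hx, hy]
    simp only [List.map_cons, PySem.List.insertBy, hb]
    by_cases h : (decide (y.2 < x.2)) = true
    · simp [h]
    · simp only [eq_false_of_ne_true h, if_false, Bool.false_eq_true]
      rw [ih (fun z hz => hys z (List.mem_cons_of_mem _ hz))]
      simp

theorem mv_sorted_map_aux (l : List (String × Int)) (acc : List (String × Int))
    (hl : ∀ p ∈ l, p.2 = mvB_count p.1) (hacc : ∀ p ∈ acc, p.2 = mvB_count p.1) :
    (l.map Prod.fst).foldl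
        (fun a x => PySem.List.insertBy (fun a b => decide (mvB_count b < mvB_count a)) x a)
        (acc.map Prod.fst)
      = (l.foldl (fun a x => PySem.List.insertBy (fun a b => decide (b.2 < a.2)) x a) acc).map
          Prod.fst := by
  induction l generalizing acc with
  | nil => rfl
  | cons p l ih =>
    rw [List.map_cons, List.foldl_cons, List.foldl_cons]
    rw [mv_insertBy_map p acc (hl p List.mem_cons_self) hacc]
    exact ih _ (fun q hq => hl q (List.mem_cons_of_mem _ hq))
      (fun q hq => by
        rcases (PySem.List.mem_insertBy ..).mp hq with h | h
        · rw [h]; exact hl _ List.mem_cons_self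
        · exact hacc q h)

-- sorting names by vowel count is the name projection of sorting count-consistent pairs
theorem mv_sorted_map (l : List (String × Int)) (hl : ∀ p ∈ l, p.2 = mvB_count p.1) :
    PySem.List.sorted (l.map Prod.fst) mvB_count true
      = (PySem.List.sorted l Prod.snd true).map Prod.fst := by
  rw [PySem.List.sorted_rev_eq_foldl_insertBy, PySem.List.sorted_rev_eq_foldl_insertBy]
  exact mv_sorted_map_aux l [] hl (by simp)

-- extract_best over a list with one element appended
theorem mv_extractBest_append (h : String × Int) (t : List (String × Int)) (y : String × Int) :
    mvB_extractBest h (t ++ [y])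
      = if (mvB_extractBest h t).1.2 < y.2 then (y, h :: t)
        else ((mvB_extractBest h t).1, (mvB_extractBest h t).2 ++ [y]) := by
  induction t generalizing h with
  | nil => simp [mvB_extractBest]
  | cons x xs ih =>
    rw [List.cons_append]
    show (let br := mvB_extractBest x (xs ++ [y]);
      if h.2 < br.1.2 then (br.1, h :: br.2) else (h, x :: (xs ++ [y]))) = _
    rw [ih x]
    simp only [mvB_extractBest]
    split_ifs with h1 h2 h3 h4 h5 h6 <;> simp_all <;> omega

theorem mv_sorted_append (l : List (String × Int)) (y : String × Int) :
    PySem.List.sorted (l ++ [y]) Prod.snd true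
      = PySem.List.insertBy (fun a b => decide (b.2 < a.2)) y
          (PySem.List.sorted l Prod.snd true) := by
  rw [PySem.List.sorted_rev_eq_foldl_insertBy, PySem.List.sorted_rev_eq_foldl_insertBy,
    List.foldl_append]
  rfl

-- stable descending sort by count = first maximum, then stable sort of the rest
theorem mv_sorted_cons (h : String × Int) (t : List (String × Int)) :
    PySem.List.sorted (h :: t) Prod.snd true
      = (mvB_extractBest h t).1 ::
          PySem.List.sorted (mvB_extractBest h t).2 Prod.snd true := by
  induction t using List.reverseRecOn generalizing h with
  | nil => rfl
  | append_singleton ys y ih =>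
    rw [show h :: (ys ++ [y]) = (h :: ys) ++ [y] from rfl, mv_sorted_append, ih h,
      mv_extractBest_append]
    by_cases hlt : (mvB_extractBest h ys).1.2 < y.2
    · rw [if_pos hlt]
      rw [show PySem.List.insertBy (fun a b => decide (b.2 < a.2)) y
            ((mvB_extractBest h ys).1 :: PySem.List.sorted (mvB_extractBest h ys).2 Prod.snd true)
          = y :: (mvB_extractBest h ys).1 ::
              PySem.List.sorted (mvB_extractBest h ys).2 Prod.snd true from by
        simp [PySem.List.insertBy, hlt]]
      rw [← ih h]
    · rw [if_neg hlt]
      rw [show PySem.List.insertBy (fun a b => decide (b.2 < a.2)) y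
            ((mvB_extractBest h ys).1 :: PySem.List.sorted (mvB_extractBest h ys).2 Prod.snd true)
          = (mvB_extractBest h ys).1 :: PySem.List.insertBy (fun a b => decide (b.2 < a.2)) y
              (PySem.List.sorted (mvB_extractBest h ys).2 Prod.snd true) from by
        simp [PySem.List.insertBy, hlt]]
      rw [← mv_sorted_append]

-- the first k names of the descending sort are the k-round selection
theorem mv_take_select (k : Nat) (l : List (String × Int)) :
    List.take k ((PySem.List.sorted l Prod.snd true).map Prod.fst) = mvB_select l k := by
  induction k generalizing l with
  | zero => simp [mvB_select]
  | succ k ih =>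
    cases l with
    | nil => simp [mvB_select, PySem.List.sorted]
    | cons h t =>
      rw [mv_sorted_cons, List.map_cons, List.take_succ_cons, ih]
      simp [mvB_select]

-- ===== VERDICT (by name: the statement is the Claim_ definition above) =====
theorem most_vowels_spec : Claim_equal_most_vowels := by
  intro country_names _
  show PySem.List.slice
      (PySem.List.sorted
        (country_names.foldl (fun acc country =>
          let count : Int := country.toList.foldl
            (fun count i => if i ∈ PySem.Set.ofList "aeiouAEIOU".toList then count + 1 else count) 0
          if count > 10 then acc ++ [country] else acc) [])
        (fun word => (word.toList.map
          (fun ch => if ("aeiouAEIOU".toList.contains ch) then (1 : Int) else 0)).sum) true)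
      (some 0) (some 3)
    = mvB_select (country_names.foldl (fun acc country =>
        let c := mvB_count country
        if c > 10 then acc ++ [(country, c)] else acc) []) 3
  obtain ⟨hmap, hkey⟩ := mv_cands_rel country_names [] [] rfl (by simp)
  rw [hmap, PySem.List.slice_zero_start, PySem.List.slice_to _ (by norm_num)]
  rw [show ((3 : Int)).toNat = 3 from rfl]
  rw [show (fun word => ((word.toList.map
        (fun ch => if ("aeiouAEIOU".toList.contains ch) then (1 : Int) else 0)).sum)) = mvB_count
      from rfl]
  rw [mv_sorted_map _ hkey, mv_take_select]
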